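-- pv_equiv track=rewrite | github.com/zhezhen-y/FXS_molecular | fmr1_primer_design.py | score_fragments
-- ===== SOURCE A (Python) =====
-- def score_fragments(binary_seq):
--     var = []
--     var.append(binary_seq[0])
--     for i in range(len(binary_seq)):
--         if i == 0:
--             continue
--         base_score = binary_seq[i]
--         if base_score == 0:
--             var.append(0)
--         else:
--             var.append(var[i-1] + 1)
--     return var
-- ===== SOURCE B (Python) =====
-- def score_fragments(binary_seq):
--     # Two staged passes: (1) run-length decomposition of the tail at zeros,
--     # (2) emit each chunk as an arithmetic range (no per-element recurrence).
--     first = binary_seq[0]        # same IndexError on empty input as the original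
--     lens, cur = [], 0
--     for x in binary_seq[1:]:
--         if x == 0:
--             lens.append(cur)
--             cur = 0
--         else:
--             cur += 1
--     lens.append(cur)
--     out = [first] + list(range(first + 1, first + 1 + lens[0]))
--     for k in lens[1:]:
--         out.append(0)
--         out.extend(range(1, k + 1))
--     return out
-- ===== Notes on version B (the rewrite author's own statement) =====
-- stated objective: alternative
-- what changed: Replaces A's per-element recurrence (each output read back as var[i-1]+1) by a two-stage run-length algorithm: first split the tail into lengths of zero-separated nonzero chunks, then emit each chunk as a whole arithmetic range (first+1..first+lens[0], then 0 followed by 1..k per later chunk).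
import Mathlib
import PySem

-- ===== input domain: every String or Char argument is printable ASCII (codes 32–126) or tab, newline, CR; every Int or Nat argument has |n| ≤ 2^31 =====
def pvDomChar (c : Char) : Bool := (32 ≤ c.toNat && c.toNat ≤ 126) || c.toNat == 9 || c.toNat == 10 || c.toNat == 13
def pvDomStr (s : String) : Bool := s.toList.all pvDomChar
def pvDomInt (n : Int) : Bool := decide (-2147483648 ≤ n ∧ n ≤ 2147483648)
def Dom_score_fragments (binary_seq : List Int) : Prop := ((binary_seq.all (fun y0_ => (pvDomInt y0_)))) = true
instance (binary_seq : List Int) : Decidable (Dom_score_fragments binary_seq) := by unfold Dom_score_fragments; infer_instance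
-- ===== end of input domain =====

-- B replaces A's per-element recurrence (reading back var[i-1]) by a two-stage
-- run-length algorithm: split the tail into zero-separated chunk lengths, then
-- emit each chunk as an arithmetic range (objective: alternative).


-- ===== PORT A =====
-- Literal port of A: var = [binary_seq[0]]; for i in range(len): skip i==0, else
-- append 0 or var[i-1]+1.  binary_seq[0] and the in-loop reads use pyGetD; the
-- only index that can be out of range is binary_seq[0] on [], excluded by Pre_.
def score_fragments (binary_seq : List Int) : List Int :=
  let var : List Int := [PySem.List.pyGetD binary_seq 0 0]
  (PySem.List.pyRange 0 (PySem.List.len binary_seq) 1).foldl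
    (fun (var : List Int) (i : Int) =>
      if i == 0 then var
      else
        let base_score := PySem.List.pyGetD binary_seq i 0
        if base_score == 0 then var ++ [0]
        else var ++ [PySem.List.pyGetD var (i - 1) 0 + 1]) var

-- ===== PORT B =====
-- Literal port of Source B.  Pass 1: the loop over binary_seq[1:] carrying (lens, cur);
-- lens.append(cur) after the loop.  Pass 2: out = [first] + range(first+1, first+1+lens[0]),
-- then for k in lens[1:]: append 0, extend range(1, k+1).  Chunk lengths are counts,
-- kept as Nat and cast where ranges need Int.  lens[0] is read with headD: lens is
-- provably nonempty (cur is always appended), so headD is exact here.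
def score_fragments_alt (binary_seq : List Int) : List Int :=
  match binary_seq with
  | [] => []   -- unreachable under Pre_ (Python raises IndexError on [])
  | first :: tail =>
    let p := tail.foldl
      (fun (s : List Nat × Nat) (x : Int) =>
        if x == 0 then (s.1 ++ [s.2], 0) else (s.1, s.2 + 1)) ([], 0)
    let lens : List Nat := p.1 ++ [p.2]
    let out : List Int := first :: PySem.List.pyRange (first + 1) (first + 1 + (lens.headD 0 : Int)) 1
    (lens.drop 1).foldl
      (fun (out : List Int) (k : Nat) => out ++ 0 :: PySem.List.pyRange 1 ((k : Int) + 1) 1) out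

-- ===== PRECONDITION & SPEC =====
-- A (and B) raise IndexError on the empty list (binary_seq[0]); nothing else raises.
def Pre_score_fragments (binary_seq : List Int) : Prop := binary_seq ≠ []
instance (binary_seq : List Int) : Decidable (Pre_score_fragments binary_seq) := by unfold Pre_score_fragments; infer_instance
def pvWitness_score_fragments : List Int := [5, 1, 0, 2]

def Spec_score_fragments (binary_seq : List Int) (out : List Int) : Prop := out = score_fragments_alt binary_seq
instance (binary_seq : List Int) (out : List Int) : Decidable (Spec_score_fragments binary_seq out) := by unfold Spec_score_fragments; infer_instance

-- ===== CLAIM (what is proved, stated in full; the proofs are below) =====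
def Claim_equal_score_fragments : Prop := ∀ (binary_seq : List Int), Dom_score_fragments binary_seq → Pre_score_fragments binary_seq → Spec_score_fragments binary_seq (score_fragments binary_seq)

-- ===== LEMMAS AND PROOFS =====

-- The common mathematical shape: the scan of running counts over the tail.
def sfScan (acc : Int) : List Int → List Int
  | [] => []
  | x :: t =>
    let v := if x ≠ 0 then acc + 1 else 0
    v :: sfScan v t

-- Recursive characterisation of pass 1's chunk lengths.
def chunks : List Int → List Nat
  | [] => [0]
  | x :: t =>
    if x = 0 then 0 :: chunks t
    else
      match chunks t with
      | [] => [1]          -- unreachable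
      | k :: r => (k + 1) :: r

def headAdd (c : Nat) : List Nat → List Nat
  | [] => []
  | k :: r => (c + k) :: r

lemma chunks_ne_nil (t : List Int) : chunks t ≠ [] := by
  cases t with
  | nil => simp [chunks]
  | cons x t =>
    unfold chunks
    split
    · simp
    · cases h : chunks t <;> simp

-- Pass 1's foldl computes (ls, c) ↦ ls ++ headAdd c (chunks t).
lemma fold_chunks (t : List Int) : ∀ (ls : List Nat) (c : Nat),
    (t.foldl (fun (s : List Nat × Nat) (x : Int) =>
        if x == 0 then (s.1 ++ [s.2], 0) else (s.1, s.2 + 1)) (ls, c)).1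
      ++ [(t.foldl (fun (s : List Nat × Nat) (x : Int) =>
        if x == 0 then (s.1 ++ [s.2], 0) else (s.1, s.2 + 1)) (ls, c)).2]
    = ls ++ headAdd c (chunks t) := by
  induction t with
  | nil => intro ls c; simp [chunks, headAdd]
  | cons x t ih =>
    intro ls c
    by_cases hx : x = 0
    · subst hx
      simp only [List.foldl_cons, beq_self_eq_true, if_true]
      rw [ih]
      cases h : chunks t with
      | nil => exact absurd h (chunks_ne_nil t)
      | cons k r => simp [chunks, headAdd, h]
    · have hxb : (x == 0) = false := by simp [hx]
      simp only [List.foldl_cons, hxb, Bool.false_eq_true, if_false]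
      rw [ih]
      cases h : chunks t with
      | nil => exact absurd h (chunks_ne_nil t)
      | cons k r =>
        simp only [chunks, hx, if_false, h, headAdd]
        congr 2
        omega

-- Pass 2 expressed as a flatMap equals the scan of running counts.
lemma chunks_scan (t : List Int) : ∀ (acc : Int),
    sfScan acc t
      = PySem.List.pyRange (acc + 1) (acc + 1 + ((chunks t).headD 0 : Int)) 1
        ++ ((chunks t).drop 1).flatMap
            (fun k => 0 :: PySem.List.pyRange 1 ((k : Int) + 1) 1) := by
  induction t with
  | nil =>
    intro acc
    simp [sfScan, chunks, PySem.List.pyRange_one_eq_nil (by omega : acc + 1 + ((0:Nat):Int) ≤ acc + 1)]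
  | cons x t ih =>
    intro acc
    by_cases hx : x = 0
    · subst hx
      have h0 : sfScan acc (0 :: t) = 0 :: sfScan 0 t := by simp [sfScan]
      rw [h0, ih 0]
      cases h : chunks t with
      | nil => exact absurd h (chunks_ne_nil t)
      | cons k r =>
        simp only [chunks, if_true, h, List.headD_cons, List.drop_one, List.tail_cons,
          Nat.cast_zero, add_zero, zero_add]
        rw [PySem.List.pyRange_one_eq_nil (le_refl (acc + 1))]
        have hk : (1:Int) + (k:Int) = (k:Int) + 1 := by ring
        simp [List.flatMap_cons, hk]
    · have h1 : sfScan acc (x :: t) = (acc + 1) :: sfScan (acc + 1) t := by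
        simp [sfScan, hx]
      rw [h1, ih (acc + 1)]
      cases h : chunks t with
      | nil => exact absurd h (chunks_ne_nil t)
      | cons k r =>
        simp only [chunks, hx, if_false, h, List.headD_cons, List.drop_one, List.tail_cons]
        rw [PySem.List.pyRange_one_cons (by push_cast; omega : acc + 1 < acc + 1 + (((k+1:Nat)) : Int))]
        simp only [List.cons_append]
        congr 2
        push_cast
        ring_nf

-- A's index loop, from index i on, appends the scan of the remaining values.
lemma loopA_eq (bs : List Int) (t : List Int) : ∀ (var : List Int) (acc : Int) (i : Nat),
    1 ≤ i → var.length = i → var.getLast? = some acc → bs.drop i = t →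
    (PySem.List.pyRange (i : Int) ((bs.length : Int)) 1).foldl
      (fun (var : List Int) (j : Int) =>
        if j == 0 then var
        else if PySem.List.pyGetD bs j 0 == 0 then var ++ [0]
        else var ++ [PySem.List.pyGetD var (j - 1) 0 + 1]) var
    = var ++ sfScan acc t := by
  induction t with
  | nil =>
    intro var acc i hi hlen hlast hdrop
    have hge : bs.length ≤ i := by
      by_contra h
      have := List.drop_eq_nil_iff.mp hdrop
      omega
    rw [PySem.List.pyRange_one_eq_nil (by exact_mod_cast hge)]
    simp [sfScan]
  | cons x t ih =>
    intro var acc i hi hlen hlast hdrop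
    have hx' : bs[i]? = some x := by rw [← List.head?_drop, hdrop]; rfl
    have hlt : i < bs.length := (List.getElem?_eq_some_iff.mp hx').1
    rw [PySem.List.pyRange_one_cons (by exact_mod_cast hlt)]
    rw [List.foldl_cons]
    have hi0 : ((i : Int) == 0) = false := by
      simp; omega
    have hbase : PySem.List.pyGetD bs (i : Int) 0 = x := by
      rw [PySem.List.pyGetD_natCast]
      simp [List.getD_eq_getElem?_getD, hx']
    have hprev : PySem.List.pyGetD var ((i : Int) - 1) 0 = acc := by
      have h1 : ((i : Int) - 1) = ((i - 1 : Nat) : Int) := by omega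
      rw [h1, PySem.List.pyGetD_natCast]
      have hgl : var[i-1]? = var.getLast? := by
        rw [List.getLast?_eq_getElem?]
        congr 1
        omega
      simp [List.getD_eq_getElem?_getD, hgl, hlast]
    simp only [hi0, Bool.false_eq_true, if_false, hbase]
    have h1 : ((i:Int) + 1) = ((i + 1 : Nat) : Int) := by push_cast; ring
    have hdrop' : bs.drop (i+1) = t := by
      rw [← List.drop_drop]
      rw [hdrop]
      rfl
    by_cases hx0 : x = 0
    · subst hx0
      simp only [beq_self_eq_true, if_true]
      rw [h1, ih (var ++ [0]) 0 (i+1) (by omega) (by simp [hlen]) (by simp) hdrop']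
      simp [sfScan]
    · have hxb : (x == 0) = false := by simp [hx0]
      simp only [hxb, Bool.false_eq_true, if_false, hprev]
      rw [h1, ih (var ++ [acc + 1]) (acc + 1) (i+1) (by omega) (by simp [hlen]) (by simp) hdrop']
      simp [sfScan, hx0]

-- B's result is first :: sfScan first tail.
lemma alt_eq_scan (first : Int) (tail : List Int) :
    score_fragments_alt (first :: tail) = first :: sfScan first tail := by
  unfold score_fragments_alt
  simp only
  have hlens := fold_chunks tail [] 0
  simp only [List.nil_append] at hlens
  have hhead : headAdd 0 (chunks tail) = chunks tail := by
    cases h : chunks tail with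
    | nil => exact absurd h (chunks_ne_nil tail)
    | cons k r => simp [headAdd]
  rw [hhead] at hlens
  -- rewrite lens to chunks tail
  have hfold : ∀ (out : List Int) (l : List Nat),
      l.foldl (fun (out : List Int) (k : Nat) =>
        out ++ 0 :: PySem.List.pyRange 1 ((k : Int) + 1) 1) out
      = out ++ l.flatMap (fun k => 0 :: PySem.List.pyRange 1 ((k : Int) + 1) 1) := by
    intro out l
    induction l generalizing out with
    | nil => simp
    | cons k r ih => simp [List.foldl_cons, ih]
  rw [hlens, hfold]
  rw [chunks_scan tail first]
  simp

-- ===== VERDICT (by name: the statement is the Claim_ definition above) =====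
theorem score_fragments_spec : Claim_equal_score_fragments := by
  intro bs _hdom hpre
  unfold Spec_score_fragments
  match bs, hpre with
  | h :: t, _ =>
    rw [alt_eq_scan]
    unfold score_fragments
    simp only
    rw [PySem.List.pyGetD_zero_cons]
    rw [PySem.List.len_eq, PySem.List.pyRange_one_cons (by simp)]
    rw [List.foldl_cons]
    simp only [beq_self_eq_true, if_true]
    have := loopA_eq (h :: t) t [h] h 1 (le_refl 1) rfl rfl rfl
    simpa using this
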